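-- pv_equiv track=rewrite | github.com/mriglobal/QC-datasets | QC_dataset.py | check_identical_values
-- ===== SOURCE A (Python) =====
-- def check_identical_values(dictionary):
--     refseq_leaders = [">NM_", ">NP_", ">NR_", ">NG_", ">NT_", ">NW_", ">NZ_", ">NC_", ">XM_", ">XP_", ">XR_"]
--
--     # Initialize a dictionary to hold the chosen sequences and their corresponding keys
--     chosen_sequences = {}
--
--     # Iterate over each key, value pair in the dictionary
--     for key, sequences in dictionary.items():
--         for seq in sequences:
--             # Convert sequence to a hashable type for comparison and storage
--             seq_tuple = tuple(seq)
--
--             # Check if this sequence has already been processed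
--             if seq_tuple in chosen_sequences:
--                 existing_key = chosen_sequences[seq_tuple]
--                 # Determine if the current key has a higher priority based on refseq_leaders
--                 if any(key.startswith(prefix) for prefix in refseq_leaders) and not any(existing_key.startswith(prefix) for prefix in refseq_leaders):
--                     # Replace the existing key with the current key if it has higher priority
--                     chosen_sequences[seq_tuple] = key
--             else:
--                 # Add the sequence and its key to the chosen_sequences if not already present
--                 chosen_sequences[seq_tuple] = key
--
--     # Reconstruct the dictionary to match the original format
--     result_dict = {}
--     for seq_tuple, key in chosen_sequences.items():
--         if key in result_dict:
--             result_dict[key].append(''.join(seq_tuple))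
--         else:
--             result_dict[key] = [''.join(seq_tuple)]
--
--     return result_dict
-- ===== SOURCE B (Python) =====
-- REFSEQ_LEADERS = (">NM_", ">NP_", ">NR_", ">NG_", ">NT_", ">NW_", ">NZ_", ">NC_", ">XM_", ">XP_", ">XR_")
--
-- def check_identical_values(dictionary):
--     # pass 1: group, in first-appearance order, each sequence with the list of keys holding it
--     groups = {}
--     for key, sequences in dictionary.items():
--         for seq in sequences:
--             t = tuple(seq)
--             groups[t] = groups.get(t, []) + [key]
--     # pass 2: for each sequence the winner is its first refseq-prefixed key, else its first key
--     result_dict = {}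
--     for t, keys in groups.items():
--         winner = next((k for k in keys if k.startswith(REFSEQ_LEADERS)), keys[0])
--         result_dict[winner] = result_dict.get(winner, []) + [''.join(t)]
--     return result_dict
-- ===== Notes on version B (the rewrite author's own statement) =====
-- stated objective: alternative
-- what changed: B replaces A's incremental winner-updating dict (conditionally overwriting the stored key whenever a refseq key meets a non-refseq one) by a grouping pass that collects, per sequence, the full ordered list of keys holding it, then computes each winner once as 'first refseq-prefixed key, else first key' and builds the result in a final pass.
import Mathlib
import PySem

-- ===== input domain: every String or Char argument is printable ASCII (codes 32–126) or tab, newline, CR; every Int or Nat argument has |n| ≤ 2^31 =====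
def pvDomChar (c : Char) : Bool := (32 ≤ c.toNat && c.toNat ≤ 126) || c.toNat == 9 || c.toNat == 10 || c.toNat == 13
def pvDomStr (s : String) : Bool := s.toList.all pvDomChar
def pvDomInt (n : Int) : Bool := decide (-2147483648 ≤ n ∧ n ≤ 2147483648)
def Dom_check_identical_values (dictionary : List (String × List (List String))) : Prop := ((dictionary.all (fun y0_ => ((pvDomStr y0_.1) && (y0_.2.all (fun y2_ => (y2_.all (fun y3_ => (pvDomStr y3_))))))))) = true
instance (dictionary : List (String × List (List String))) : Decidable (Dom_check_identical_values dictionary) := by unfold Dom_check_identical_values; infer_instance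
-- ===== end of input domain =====

-- B replaces A's incremental conditional-overwrite winner dict by a group-then-pick decomposition
-- (per sequence: ordered list of holding keys, winner = first refseq-prefixed key else first key);
-- objective: alternative decomposition, same cost. RETURN value only (the Python takes a dict).

def refseq_leaders : List String :=
  [">NM_", ">NP_", ">NR_", ">NG_", ">NT_", ">NW_", ">NZ_", ">NC_", ">XM_", ">XP_", ">XR_"]

-- ===== PORT A =====
-- loop body of A's first loop: conditional replacement of the chosen key for seq
def aStep (key : String) (ch : PySem.Dict (List String) String) (seq : List String) :
    PySem.Dict (List String) String :=
  match ch.get? seq with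
  | some existing =>
      if (refseq_leaders.any fun p => PySem.Str.startswith key p)
          && !(refseq_leaders.any fun p => PySem.Str.startswith existing p)
      then ch.insert seq key else ch
  | none => ch.insert seq key

-- loop body of A's reconstruction loop (append-or-create)
def aResStep (res : PySem.Dict String (List String)) (p : List String × String) :
    PySem.Dict String (List String) :=
  match res.get? p.2 with
  | some l => res.insert p.2 (l ++ [PySem.Str.join "" p.1])
  | none => res.insert p.2 [PySem.Str.join "" p.1]

def check_identical_values (dictionary : List (String × List (List String))) :
    List (String × List String) :=
  let d := PySem.Dict.ofList dictionary
  let chosen := d.items.foldl (fun ch kv => kv.2.foldl (aStep kv.1) ch) PySem.Dict.empty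
  (chosen.items.foldl aResStep PySem.Dict.empty).items

-- ===== PORT B =====
def isRefseq (k : String) : Bool := refseq_leaders.any fun p => PySem.Str.startswith k p

-- winner of a (nonempty) list of keys: first refseq-prefixed key, else the first key
def winner (ks : List String) : String := (ks.find? isRefseq).getD (ks.headD "")

-- grouping body: groups[t] = groups.get(t, []) + [key]
def bStep (key : String) (g : PySem.Dict (List String) (List String)) (seq : List String) :
    PySem.Dict (List String) (List String) :=
  g.modify seq [] (· ++ [key])

-- result body: result_dict[winner] = result_dict.get(winner, []) + [''.join(t)]
def bResStep (res : PySem.Dict String (List String)) (p : List String × List String) :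
    PySem.Dict String (List String) :=
  res.modify (winner p.2) [] (· ++ [PySem.Str.join "" p.1])

def check_identical_values_alt (dictionary : List (String × List (List String))) :
    List (String × List String) :=
  let d := PySem.Dict.ofList dictionary
  let groups := d.items.foldl (fun g kv => kv.2.foldl (bStep kv.1) g) PySem.Dict.empty
  (groups.items.foldl bResStep PySem.Dict.empty).items

-- ===== PRECONDITION & SPEC =====
def Spec_check_identical_values (dictionary : List (String × List (List String))) (out : List (String × List String)) : Prop := out = check_identical_values_alt dictionary
instance (dictionary : List (String × List (List String))) (out : List (String × List String)) : Decidable (Spec_check_identical_values dictionary out) := by unfold Spec_check_identical_values; infer_instance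

-- ===== CLAIM (what is proved, stated in full; the proofs are below) =====
def Claim_equal_check_identical_values : Prop := ∀ (dictionary : List (String × List (List String))), Dom_check_identical_values dictionary → Spec_check_identical_values dictionary (check_identical_values dictionary)

-- ===== LEMMAS AND PROOFS =====

-- A's chosen dict is B's groups dict with each key-list collapsed to its winner.
def mapW (g : PySem.Dict (List String) (List String)) : PySem.Dict (List String) String :=
  PySem.Dict.mk (g.items.map fun p => (p.1, winner p.2))

theorem items_mapW (g : PySem.Dict (List String) (List String)) :
    (mapW g).items = g.items.map (fun p => (p.1, winner p.2)) := rfl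

-- invariant of B's groups dict
def GInv (g : PySem.Dict (List String) (List String)) : Prop :=
  g.keys.Nodup ∧ ∀ p ∈ g.items, p.2 ≠ []

theorem get?_mk_map (l : List (List String × List String)) (s : List String) :
    (PySem.Dict.mk (l.map fun p => (p.1, winner p.2))).get? s
      = ((PySem.Dict.mk l).get? s).map winner := by
  induction l with
  | nil => rfl
  | cons p rest ih =>
      obtain ⟨k, v⟩ := p
      simp only [List.map_cons, PySem.Dict.get?_mk_cons]
      by_cases h : (k == s) = true
      · simp [h]
      · simp only [h]; exact ih

theorem get?_mapW (g : PySem.Dict (List String) (List String)) (s : List String) :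
    (mapW g).get? s = (g.get? s).map winner :=
  get?_mk_map g.items s

theorem winner_single (key : String) : winner [key] = key := by
  unfold winner; cases h : isRefseq key <;> simp [List.find?, h]

theorem winner_append (ks : List String) (key : String) (h : ks ≠ []) :
    winner (ks ++ [key]) =
      if isRefseq key && !isRefseq (winner ks) then key else winner ks := by
  unfold winner
  rw [List.find?_append]
  cases hf : ks.find? isRefseq with
  | some r =>
      have hr : isRefseq r = true := List.find?_some hf
      simp [hr]
  | none =>
      obtain ⟨a, t, rfl⟩ : ∃ a t, ks = a :: t := by
        cases ks with
        | nil => exact absurd rfl h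
        | cons a t => exact ⟨a, t, rfl⟩
      have hh : isRefseq a = false := by
        simpa using List.find?_eq_none.mp hf a (by simp)
      cases hk : isRefseq key with
      | true => simp [List.find?, hk, hh]
      | false => simp [List.find?, hk, hh]

theorem bStep_eq_insert (key : String) (g : PySem.Dict (List String) (List String)) (seq : List String) :
    bStep key g seq = g.insert seq (g.getD seq [] ++ [key]) := rfl

theorem bStep_inv (key : String) (g : PySem.Dict (List String) (List String)) (seq : List String)
    (h : GInv g) : GInv (bStep key g seq) := by
  obtain ⟨hnd, hne⟩ := h
  rw [bStep_eq_insert]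
  refine ⟨PySem.Dict.nodup_keys_insert _ _ _ hnd, ?_⟩
  intro p hp
  rcases (PySem.Dict.mem_items_insert _ _ _ _).mp hp with h1 | h2
  · subst h1; simp
  · exact hne p h2.1

theorem step_eq (key : String) (g : PySem.Dict (List String) (List String)) (seq : List String)
    (h : GInv g) : aStep key (mapW g) seq = mapW (bStep key g seq) := by
  obtain ⟨hnd, hne⟩ := h
  rw [bStep_eq_insert]
  have hany : ∀ k, (refseq_leaders.any fun p => PySem.Str.startswith k p) = isRefseq k :=
    fun _ => rfl
  unfold aStep
  cases hg : g.get? seq with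
  | none =>
      have hmg : (mapW g).get? seq = none := by rw [get?_mapW, hg]; rfl
      have hc : g.contains seq = false := by rw [PySem.Dict.contains_eq_isSome_get?, hg]; rfl
      have hcm : (mapW g).contains seq = false := by
        rw [PySem.Dict.contains_eq_isSome_get?, hmg]; rfl
      have hgd : g.getD seq [] = [] := PySem.Dict.getD_of_get?_eq_none g [] hg
      simp only [hmg]
      apply PySem.Dict.ext
      rw [PySem.Dict.items_insert_of_not_contains _ _ hcm, hgd, items_mapW, items_mapW,
        PySem.Dict.items_insert_of_not_contains _ _ hc]
      simp [winner_single]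
  | some ks =>
      have hks : ks ≠ [] := hne (seq, ks) (PySem.Dict.mem_items_of_get?_eq_some g hg)
      have hmg : (mapW g).get? seq = some (winner ks) := by rw [get?_mapW, hg]; rfl
      have hc : g.contains seq = true := by rw [PySem.Dict.contains_eq_isSome_get?, hg]; rfl
      have hcm : (mapW g).contains seq = true := by
        rw [PySem.Dict.contains_eq_isSome_get?, hmg]; rfl
      have hgd : g.getD seq [] = ks := PySem.Dict.getD_of_get?_eq_some g [] hg
      have hwin := winner_append ks key hks
      simp only [hmg, hany, hgd]
      by_cases hcond : (isRefseq key && !isRefseq (winner ks)) = true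
      · rw [if_pos hcond]
        apply PySem.Dict.ext
        rw [PySem.Dict.items_insert_of_contains _ _ hcm, items_mapW, items_mapW,
          PySem.Dict.items_insert_of_contains _ _ hc]
        simp only [List.map_map]
        apply List.map_congr_left
        intro p hp
        by_cases hps : (p.1 == seq) = true
        · simp [Function.comp, hps, hwin, hcond]
        · simp [Function.comp, hps]
      · rw [if_neg hcond]
        apply PySem.Dict.ext
        rw [items_mapW, items_mapW, PySem.Dict.items_insert_of_contains _ _ hc]
        simp only [List.map_map]
        refine (List.map_congr_left ?_).symm
        intro p hp
        by_cases hps : (p.1 == seq) = true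
        · have hp1 : p.1 = seq := by exact eq_of_beq hps
          have hpks : p.2 = ks := by
            have h2 := PySem.Dict.get?_of_mem_items g (k := p.1) (v := p.2) hp hnd
            rw [hp1, hg] at h2
            exact (Option.some_inj.mp h2).symm
          simp only [Function.comp, hps, if_pos]
          rw [hwin, if_neg hcond, hp1, hpks]
        · simp [Function.comp, hps]

theorem inner_eq (key : String) (seqs : List (List String))
    (g : PySem.Dict (List String) (List String)) (h : GInv g) :
    seqs.foldl (aStep key) (mapW g) = mapW (seqs.foldl (bStep key) g) := by
  induction seqs generalizing g h with
  | nil => rfl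
  | cons s rest ih =>
      simp only [List.foldl_cons, step_eq key g s h]
      exact ih _ (bStep_inv key g s h)

theorem inner_inv (key : String) (seqs : List (List String))
    (g : PySem.Dict (List String) (List String)) (h : GInv g) :
    GInv (seqs.foldl (bStep key) g) := by
  induction seqs generalizing g h with
  | nil => exact h
  | cons s rest ih => exact ih _ (bStep_inv key g s h)

theorem outer_eq (l : List (String × List (List String)))
    (g : PySem.Dict (List String) (List String)) (h : GInv g) :
    l.foldl (fun ch kv => kv.2.foldl (aStep kv.1) ch) (mapW g)
      = mapW (l.foldl (fun g kv => kv.2.foldl (bStep kv.1) g) g) := by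
  induction l generalizing g h with
  | nil => rfl
  | cons kv rest ih =>
      simp only [List.foldl_cons, inner_eq kv.1 kv.2 g h]
      exact ih _ (inner_inv kv.1 kv.2 g h)

theorem resStep_eq (res : PySem.Dict String (List String)) (p : List String × List String) :
    aResStep res (p.1, winner p.2) = bResStep res p := by
  unfold aResStep bResStep PySem.Dict.modify
  cases hg : res.get? (winner p.2) with
  | some l => simp only [PySem.Dict.getD_of_get?_eq_some _ _ hg]
  | none => simp only [PySem.Dict.getD_of_get?_eq_none _ _ hg, List.nil_append]

-- ===== VERDICT (by name: the statement is the Claim_ definition above) =====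
theorem check_identical_values_spec : Claim_equal_check_identical_values := by
  intro dictionary _
  unfold Spec_check_identical_values check_identical_values check_identical_values_alt
  have hinv : GInv PySem.Dict.empty := ⟨List.nodup_nil, by intro p hp; cases hp⟩
  have h1 := outer_eq (PySem.Dict.ofList dictionary).items PySem.Dict.empty hinv
  simp only [] at h1 ⊢
  rw [show (mapW PySem.Dict.empty) = PySem.Dict.empty from rfl] at h1
  rw [h1]
  congr 1
  rw [show (mapW ((PySem.Dict.ofList dictionary).items.foldl (fun g kv => kv.2.foldl (bStep kv.1) g) PySem.Dict.empty)).items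
        = ((PySem.Dict.ofList dictionary).items.foldl (fun g kv => kv.2.foldl (bStep kv.1) g) PySem.Dict.empty).items.map (fun p => (p.1, winner p.2)) from rfl]
  rw [List.foldl_map]
  exact PySem.List.foldl_congr_mem _ _ _ _ (fun acc p _ => resStep_eq acc p)
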